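-- pv_equiv track=rewrite | github.com/sleticalboy/dailearn | pytest/src/etools/algo_generate_module.py | parse_structs
-- ===== SOURCE A (Python) =====
-- def parse_structs(lines: list[str]) -> set[str]:
--     ss: set[str] = set()
--     s = ''
--     started = False
--     for line in lines:
--         # struct 开始
--         if 'typedef struct' in line:
--             started = True
--         if started and ';' in line and '(' not in line:
--             s += line.replace('\n', '').strip()
--         # struct 结束
--         if started and '}' in line and ';' in line:
--             started = False
--             ss.add(s)
--             s = ''
--     return ss
-- ===== SOURCE B (Python) =====
-- def parse_structs(lines: list[str]) -> set[str]:
--     # Precompute the trigger and closer index lists, then pair them with two pointers.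
--     n = len(lines)
--     trigs = [i for i in range(n) if 'typedef struct' in lines[i]]
--     closes = [i for i in range(n) if '}' in lines[i] and ';' in lines[i]]
--     out = []
--     pos = ti = ci = 0
--     while True:
--         while ti < len(trigs) and trigs[ti] < pos:
--             ti += 1
--         if ti == len(trigs):
--             break
--         t = trigs[ti]
--         ti += 1
--         while ci < len(closes) and closes[ci] < t:
--             ci += 1
--         if ci == len(closes):
--             break
--         c = closes[ci]
--         ci += 1
--         out.append(''.join(l.replace('\n', '').strip()
--                            for l in lines[t:c + 1] if ';' in l and '(' not in l))
--         pos = c + 1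
--     return set(out)
-- ===== Notes on version B (the rewrite author's own statement) =====
-- stated objective: alternative
-- what changed: A's single-pass boolean-flag state machine with a string accumulator is replaced by precomputing the index lists of trigger lines ('typedef struct') and closer lines ('};'), pairing them with a two-pointer merge, and rendering each paired slice lines[t:c+1] independently.
import Mathlib
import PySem

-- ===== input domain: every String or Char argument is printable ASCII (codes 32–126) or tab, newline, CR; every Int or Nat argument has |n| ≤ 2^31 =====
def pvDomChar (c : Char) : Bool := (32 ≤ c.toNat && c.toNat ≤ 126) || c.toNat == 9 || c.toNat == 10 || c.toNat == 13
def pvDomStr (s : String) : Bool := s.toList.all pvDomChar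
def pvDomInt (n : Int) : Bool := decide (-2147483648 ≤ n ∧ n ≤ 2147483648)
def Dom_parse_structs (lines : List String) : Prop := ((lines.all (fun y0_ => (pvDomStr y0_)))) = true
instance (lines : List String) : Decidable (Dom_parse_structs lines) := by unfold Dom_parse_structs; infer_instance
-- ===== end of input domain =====

-- B replaces A's single-pass flag/accumulator state machine by precomputed trigger/closer
-- index lists paired with a two-pointer merge, rendering each lines[t:c+1] slice (objective: alternative).

-- ===== PORT A =====
-- A's loop body, step for step: update `started`, maybe extend the partial string, maybe close.
def pvStepA (st : PySem.Set String × String × Bool) (line : String) :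
    PySem.Set String × String × Bool :=
  let ss := st.1
  let s := st.2.1
  let started := st.2.2
  let started := if PySem.Str.isIn "typedef struct" line then true else started
  let s := if started && PySem.Str.isIn ";" line && !PySem.Str.isIn "(" line then
      s ++ PySem.Str.strip (PySem.Str.replace line "\n" "") else s
  if started && PySem.Str.isIn "}" line && PySem.Str.isIn ";" line then
    (PySem.Set.add ss s, "", false)
  else
    (ss, s, started)

def parse_structs (lines : List String) : List String :=
  (lines.foldl pvStepA (PySem.Set.empty, "", false)).1

-- ===== PORT B =====
def pvTrig (l : String) : Bool := PySem.Str.isIn "typedef struct" l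
def pvCls (l : String) : Bool := PySem.Str.isIn "}" l && PySem.Str.isIn ";" l
def pvKeep (l : String) : Bool := PySem.Str.isIn ";" l && !PySem.Str.isIn "(" l
def pvClean (l : String) : String := PySem.Str.strip (PySem.Str.replace l "\n" "")

-- [i for i in range(len(lines)) if p(lines[i])]  (indices are in range, so getD is exact)
def pvIdx (p : String → Bool) (lines : List String) : List Nat :=
  (List.range lines.length).filter (fun i => p (lines.getD i ""))

-- ''.join(clean(l) for l in block if keep(l))
def pvRender (b : List String) : String :=
  PySem.Str.join "" ((b.filter pvKeep).map pvClean)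

-- the outer while loop; the two inner pointer-advancing while loops are the dropWhiles
-- (the port consumes the remaining index lists where the Python advances ti/ci).
def pvLoop (lines : List String) (pos : Nat) (trigs closes : List Nat) : List String :=
  match h1 : trigs.dropWhile (fun t => decide (t < pos)) with
  | [] => []
  | t :: trest =>
    match closes.dropWhile (fun c => decide (c < t)) with
    | [] => []
    | c :: crest =>
      -- lines[t:c+1] with 0 ≤ t ≤ c+1 is exactly drop-then-take
      pvRender ((lines.drop t).take (c + 1 - t)) :: pvLoop lines (c + 1) trest crest
termination_by trigs.length
decreasing_by
  have h := List.length_dropWhile_le (fun t => decide (t < pos)) trigs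
  rw [h1] at h
  simp at h
  omega

def parse_structs_alt (lines : List String) : List String :=
  PySem.Set.ofList (pvLoop lines 0 (pvIdx pvTrig lines) (pvIdx pvCls lines))

-- ===== PRECONDITION & SPEC =====
def Spec_parse_structs (lines : List String) (out : List String) : Prop := out = parse_structs_alt lines
instance (lines : List String) (out : List String) : Decidable (Spec_parse_structs lines out) := by unfold Spec_parse_structs; infer_instance

-- ===== CLAIM (what is proved, stated in full; the proofs are below) =====
def Claim_equal_parse_structs : Prop := ∀ (lines : List String), Dom_parse_structs lines → Spec_parse_structs lines (parse_structs lines)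

-- ===== LEMMAS AND PROOFS =====

-- the indices ≥ lo whose line satisfies p
def pvIdxFrom (p : String → Bool) (L : List String) (lo : Nat) : List Nat :=
  (List.range' lo (L.length - lo)).filter (fun i => p (L.getD i ""))

theorem pvIdx_eq (p : String → Bool) (L : List String) : pvIdx p L = pvIdxFrom p L 0 := by
  simp [pvIdx, pvIdxFrom, List.range_eq_range']

theorem idxFrom_unfold (p : String → Bool) (L : List String) (lo : Nat) (h : lo < L.length) :
    pvIdxFrom p L lo =
      if p (L.getD lo "") then lo :: pvIdxFrom p L (lo + 1) else pvIdxFrom p L (lo + 1) := by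
  have hlen : L.length - lo = (L.length - (lo + 1)) + 1 := by omega
  simp only [pvIdxFrom, hlen, List.range'_succ, List.filter_cons]


theorem idxFrom_nil (p : String → Bool) (L : List String) (lo : Nat) (h : L.length ≤ lo) :
    pvIdxFrom p L lo = [] := by
  simp [pvIdxFrom, Nat.sub_eq_zero_of_le h]

theorem mem_idxFrom (p : String → Bool) (L : List String) (lo x : Nat)
    (h : x ∈ pvIdxFrom p L lo) : lo ≤ x ∧ x < L.length ∧ p (L.getD x "") = true := by
  simp only [pvIdxFrom, List.mem_filter, List.mem_range'_1] at h
  exact ⟨h.1.1, by omega, h.2⟩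


theorem idxFrom_dropWhile (p : String → Bool) (L : List String) :
    ∀ (k lo pos : Nat), pos - lo = k → lo ≤ pos →
      (pvIdxFrom p L lo).dropWhile (fun t => decide (t < pos)) = pvIdxFrom p L pos := by
  intro k
  induction k with
  | zero =>
    intro lo pos hk hle
    have : lo = pos := by omega
    subst this
    cases h : pvIdxFrom p L lo with
    | nil => simp
    | cons t r =>
      have ht := mem_idxFrom p L lo t (by rw [h]; exact List.mem_cons_self)
      rw [List.dropWhile_cons]
      simp [Nat.not_lt.mpr ht.1]
  | succ n ih =>
    intro lo pos hk hle
    have hlt : lo < pos := by omega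
    by_cases hl : lo < L.length
    · rw [idxFrom_unfold p L lo hl]
      split
      · rw [List.dropWhile_cons]
        simp only [hlt, decide_true]
        exact ih (lo+1) pos (by omega) (by omega)
      · exact ih (lo+1) pos (by omega) (by omega)
    · rw [idxFrom_nil p L lo (by omega), idxFrom_nil p L pos (by omega)]
      simp

theorem idxFrom_cons (p : String → Bool) (L : List String) :
    ∀ (k lo t : Nat) (r : List Nat), L.length - lo = k → pvIdxFrom p L lo = t :: r →
      r = pvIdxFrom p L (t + 1) ∧ ∀ i, lo ≤ i → i < t → p (L.getD i "") = false := by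
  intro k
  induction k with
  | zero =>
    intro lo t r hk h
    rw [idxFrom_nil p L lo (by omega)] at h
    exact absurd h (by simp)
  | succ n ih =>
    intro lo t r hk h
    have hl : lo < L.length := by omega
    rw [idxFrom_unfold p L lo hl] at h
    by_cases hp : p (L.getD lo "") = true
    · rw [if_pos hp] at h
      obtain ⟨h1, h2⟩ := List.cons.inj h
      subst h1; subst h2
      exact ⟨rfl, fun i h1 h2 => absurd (by omega : i < i) (by omega)⟩
    · rw [if_neg hp] at h
      obtain ⟨h1, h2⟩ := ih (lo+1) t r (by omega) h
      have ht := mem_idxFrom p L (lo+1) t (by rw [h]; exact List.mem_cons_self)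
      refine ⟨h1, fun i hi1 hi2 => ?_⟩
      rcases Nat.eq_or_lt_of_le hi1 with heq | hlt
      · subst heq; simpa using hp
      · exact h2 i hlt hi2

theorem idxFrom_empty (p : String → Bool) (L : List String) :
    ∀ (k lo : Nat), L.length - lo = k → pvIdxFrom p L lo = [] →
      ∀ i, lo ≤ i → i < L.length → p (L.getD i "") = false := by
  intro k
  induction k with
  | zero => intro lo hk h i h1 h2; omega
  | succ n ih =>
    intro lo hk h i h1 h2
    have hl : lo < L.length := by omega
    rw [idxFrom_unfold p L lo hl] at h
    by_cases hp : p (L.getD lo "") = true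
    · rw [if_pos hp] at h; exact absurd h (by simp)
    · rw [if_neg hp] at h
      rcases Nat.eq_or_lt_of_le h1 with heq | hlt
      · subst heq; simpa using hp
      · exact ih (lo+1) (by omega) h i hlt h2


-- the contribution of one line to a block's rendered string
def pvR (l : String) : String := if pvKeep l then pvClean l else ""

theorem join_empty_cons (x : String) (xs : List String) :
    PySem.Str.join "" (x :: xs) = x ++ PySem.Str.join "" xs := by
  cases xs with
  | nil => simp [PySem.Str.join, PySem.Chars.join_singleton]
  | cons b t => simp [PySem.Str.join, PySem.Chars.join_cons_cons]

theorem render_nil : pvRender [] = "" := by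
  simp [pvRender, PySem.Str.join, PySem.Chars.join_nil]

theorem render_cons (l : String) (xs : List String) :
    pvRender (l :: xs) = pvR l ++ pvRender xs := by
  by_cases h : pvKeep l = true
  · simp [pvRender, pvR, h, join_empty_cons]
  · simp only [Bool.not_eq_true] at h
    simp [pvRender, pvR, h]

theorem step_notrig (ss : PySem.Set String) (l : String) (h : pvTrig l = false) :
    pvStepA (ss, "", false) l = (ss, "", false) := by
  simp [pvStepA, pvTrig] at h ⊢
  simp [h]

theorem step_trig (ss : PySem.Set String) (s : String) (l : String) (h : pvTrig l = true) :
    pvStepA (ss, s, false) l = pvStepA (ss, s, true) l := by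
  simp [pvTrig] at h
  simp [pvStepA, h]

theorem step_started (ss : PySem.Set String) (s : String) (l : String) :
    pvStepA (ss, s, true) l =
      if pvCls l then (PySem.Set.add ss (s ++ pvR l), "", false) else (ss, s ++ pvR l, true) := by
  by_cases hs : PySem.Chars.isIn [';'] l.toList = true <;>
  by_cases hp : PySem.Chars.isIn ['('] l.toList = true <;>
  by_cases hb : PySem.Chars.isIn ['}'] l.toList = true <;>
  simp [pvStepA, pvCls, pvKeep, pvR, pvClean, hs, hp, hb]

theorem fold_notrig (ls : List String) :
    ∀ (ss : PySem.Set String), (∀ l ∈ ls, pvTrig l = false) →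
      ls.foldl pvStepA (ss, "", false) = (ss, "", false) := by
  induction ls with
  | nil => intro ss _; rfl
  | cons l t ih =>
    intro ss h
    rw [List.foldl_cons, step_notrig ss l (h l List.mem_cons_self)]
    exact ih ss (fun x hx => h x (List.mem_cons_of_mem l hx))

theorem pvLoop_nil (lines : List String) (pos : Nat) (trigs closes : List Nat)
    (h : trigs.dropWhile (fun t => decide (t < pos)) = []) :
    pvLoop lines pos trigs closes = [] := by
  rw [pvLoop]
  rw [h]

theorem pvLoop_cons_nil (lines : List String) (pos : Nat) (trigs closes : List Nat)
    (t : Nat) (trest : List Nat)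
    (h1 : trigs.dropWhile (fun x => decide (x < pos)) = t :: trest)
    (h2 : closes.dropWhile (fun c => decide (c < t)) = []) :
    pvLoop lines pos trigs closes = [] := by
  rw [pvLoop]
  rw [h1]
  show (match closes.dropWhile (fun c => decide (c < t)) with
    | [] => []
    | c :: crest =>
      pvRender ((lines.drop t).take (c + 1 - t)) :: pvLoop lines (c + 1) trest crest) = []
  rw [h2]

theorem pvLoop_cons (lines : List String) (pos : Nat) (trigs closes : List Nat)
    (t c : Nat) (trest crest : List Nat)
    (h1 : trigs.dropWhile (fun x => decide (x < pos)) = t :: trest)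
    (h2 : closes.dropWhile (fun x => decide (x < t)) = c :: crest) :
    pvLoop lines pos trigs closes =
      pvRender ((lines.drop t).take (c + 1 - t)) :: pvLoop lines (c + 1) trest crest := by
  rw [pvLoop]
  rw [h1]
  show (match closes.dropWhile (fun x => decide (x < t)) with
    | [] => []
    | c :: crest =>
      pvRender ((lines.drop t).take (c + 1 - t)) :: pvLoop lines (c + 1) trest crest) =
    pvRender ((lines.drop t).take (c + 1 - t)) :: pvLoop lines (c + 1) trest crest
  rw [h2]

-- started run, no closer from q on: the final set is unchanged
theorem run_noclose (L : List String) :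
    ∀ (k q : Nat) (s : String) (ss : PySem.Set String), L.length - q = k →
      pvIdxFrom pvCls L q = [] →
      ((L.drop q).foldl pvStepA (ss, s, true)).1 = ss := by
  intro k
  induction k with
  | zero =>
    intro q s ss hk h
    rw [List.drop_eq_nil_of_le (by omega)]
    rfl
  | succ n ih =>
    intro q s ss hk h
    have hq : q < L.length := by omega
    have hcls : pvCls (L.getD q "") = false := by
      rw [idxFrom_unfold pvCls L q hq] at h
      by_cases hc : pvCls (L.getD q "") = true
      · rw [if_pos hc] at h; exact absurd h (by simp)
      · simpa using hc
    have h2 : pvIdxFrom pvCls L (q+1) = [] := by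
      rw [idxFrom_unfold pvCls L q hq, if_neg (by rw [hcls]; simp)] at h
      exact h
    rw [List.drop_eq_getElem_cons hq, List.foldl_cons, ← List.getD_eq_getElem L "" hq,
      step_started, if_neg (by rw [hcls]; simp)]
    exact ih (q+1) (s ++ pvR (L.getD q "")) ss (by omega) h2

-- started run with first closer c: the block closes with s ++ render(lines[q:c+1])
theorem run_close (L : List String) :
    ∀ (k q c : Nat) (crest : List Nat) (s : String) (ss : PySem.Set String), L.length - q = k →
      pvIdxFrom pvCls L q = c :: crest →
      (L.drop q).foldl pvStepA (ss, s, true) =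
        (L.drop (c+1)).foldl pvStepA
          (PySem.Set.add ss (s ++ pvRender ((L.drop q).take (c + 1 - q))), "", false) := by
  intro k
  induction k with
  | zero =>
    intro q c crest s ss hk h
    rw [idxFrom_nil pvCls L q (by omega)] at h
    exact absurd h (by simp)
  | succ n ih =>
    intro q c crest s ss hk h
    have hq : q < L.length := by omega
    rw [List.drop_eq_getElem_cons hq, List.foldl_cons, ← List.getD_eq_getElem L "" hq,
      step_started]
    by_cases hc : pvCls (L.getD q "") = true
    · have hcq : c = q := by
        rw [idxFrom_unfold pvCls L q hq, if_pos hc] at h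
        exact (List.cons.inj h).1.symm
      subst hcq
      rw [if_pos hc]
      have htake : (L.getD c "" :: L.drop (c+1)).take (c + 1 - c) = [L.getD c ""] := by
        have h1 : c + 1 - c = 1 := by omega
        rw [h1]
        simp
      rw [htake, render_cons, render_nil]
      simp
    · have hc' : pvCls (L.getD q "") = false := by simpa using hc
      have h2 : pvIdxFrom pvCls L (q+1) = c :: crest := by
        rw [idxFrom_unfold pvCls L q hq, if_neg (by rw [hc']; simp)] at h
        exact h
      have hcge : q + 1 ≤ c :=
        (mem_idxFrom pvCls L (q+1) c (by rw [h2]; exact List.mem_cons_self)).1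
      rw [if_neg (by rw [hc']; simp)]
      rw [ih (q+1) c crest (s ++ pvR (L.getD q "")) ss (by omega) h2]
      have htake : (L.getD q "" :: L.drop (q+1)).take (c + 1 - q) =
          L.getD q "" :: (L.drop (q+1)).take (c + 1 - (q+1)) := by
        have h1 : c + 1 - q = (c + 1 - (q+1)) + 1 := by omega
        rw [h1, List.take_succ_cons]
      rw [htake, render_cons, String.append_assoc]

theorem pvLoop_trig_shift (L : List String) (pos a : Nat) (ha : a ≤ pos) (closes : List Nat) :
    pvLoop L pos (pvIdxFrom pvTrig L a) closes = pvLoop L pos (pvIdxFrom pvTrig L pos) closes := by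
  have hd : (pvIdxFrom pvTrig L a).dropWhile (fun t => decide (t < pos)) = pvIdxFrom pvTrig L pos :=
    idxFrom_dropWhile pvTrig L (pos - a) a pos (by omega) ha
  have hd2 : (pvIdxFrom pvTrig L pos).dropWhile (fun t => decide (t < pos)) = pvIdxFrom pvTrig L pos :=
    idxFrom_dropWhile pvTrig L 0 pos pos (by omega) (le_refl pos)
  cases hc : pvIdxFrom pvTrig L pos with
  | nil =>
    rw [pvLoop_nil L pos _ closes (hd.trans hc), pvLoop_nil L pos _ closes (by simp)]
  | cons t trest =>
    cases hcc : closes.dropWhile (fun c => decide (c < t)) with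
    | nil =>
      rw [pvLoop_cons_nil L pos _ closes t trest (hd.trans hc) hcc,
        pvLoop_cons_nil L pos _ closes t trest (by rw [← hc]; exact hd2) hcc]
    | cons c crest =>
      rw [pvLoop_cons L pos _ closes t c trest crest (hd.trans hc) hcc,
        pvLoop_cons L pos _ closes t c trest crest (by rw [← hc]; exact hd2) hcc]

theorem main_loop (L : List String) :
    ∀ (k pos : Nat) (ss : PySem.Set String), L.length - pos = k →
      ((L.drop pos).foldl pvStepA (ss, "", false)).1 =
        List.foldl PySem.Set.add ss
          (pvLoop L pos (pvIdxFrom pvTrig L pos) (pvIdxFrom pvCls L pos)) := by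
  intro k
  induction k using Nat.strong_induction_on with
  | _ k IH =>
  intro pos ss hk
  have hdw : (pvIdxFrom pvTrig L pos).dropWhile (fun t => decide (t < pos)) =
      pvIdxFrom pvTrig L pos := idxFrom_dropWhile pvTrig L 0 pos pos (by omega) (le_refl pos)
  cases ht : pvIdxFrom pvTrig L pos with
  | nil =>
    have hall : ∀ l ∈ L.drop pos, pvTrig l = false := by
      intro l hl
      obtain ⟨j, hj, hlj⟩ := List.mem_iff_getElem.mp hl
      have hjl : pos + j < L.length := by
        have := List.length_drop (l := L) (i := pos); omega
      rw [List.getElem_drop] at hlj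
      have := idxFrom_empty pvTrig L (L.length - pos) pos rfl ht (pos + j) (by omega) hjl
      rw [← hlj, ← List.getD_eq_getElem L "" hjl]
      exact this
    rw [fold_notrig (L.drop pos) ss hall, pvLoop_nil L pos _ _ (by simp)]
    rfl
  | cons t trest =>
    obtain ⟨hpt, htl, htrig⟩ := mem_idxFrom pvTrig L pos t (by rw [ht]; exact List.mem_cons_self)
    obtain ⟨htrest, hmin⟩ := idxFrom_cons pvTrig L (L.length - pos) pos t trest rfl ht
    have hdw' : (t :: trest).dropWhile (fun x => decide (x < pos)) = t :: trest := by
      rw [← ht]; exact hdw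
    -- split the suffix at t
    have hsplit : L.drop pos = (L.drop pos).take (t - pos) ++ L.drop t := by
      conv_lhs => rw [← List.take_append_drop (t - pos) (L.drop pos)]
      rw [List.drop_drop]
      congr 2
      omega
    have hpre : ∀ l ∈ (L.drop pos).take (t - pos), pvTrig l = false := by
      intro l hl
      obtain ⟨j, hj, hlj⟩ := List.mem_iff_getElem.mp hl
      rw [List.length_take, List.length_drop] at hj
      have hjl : pos + j < L.length := by omega
      rw [List.getElem_take, List.getElem_drop] at hlj
      rw [← hlj, ← List.getD_eq_getElem L "" hjl]
      exact hmin (pos + j) (by omega) (by omega)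
    rw [hsplit, List.foldl_append, fold_notrig _ ss hpre]
    -- the trigger line is processed as if already started
    have hstep : (L.drop t).foldl pvStepA (ss, "", false) =
        (L.drop t).foldl pvStepA (ss, "", true) := by
      rw [List.drop_eq_getElem_cons htl, List.foldl_cons, List.foldl_cons,
        ← List.getD_eq_getElem L "" htl, step_trig ss "" (L.getD t "") htrig]
    rw [hstep]
    cases hcl : pvIdxFrom pvCls L t with
    | nil =>
      rw [run_noclose L (L.length - t) t "" ss rfl hcl,
        pvLoop_cons_nil L pos _ _ t trest hdw'
          (by rw [idxFrom_dropWhile pvCls L (t - pos) pos t rfl hpt, hcl])]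
      rfl
    | cons c crest =>
      obtain ⟨htc, hcl2, _⟩ := mem_idxFrom pvCls L t c (by rw [hcl]; exact List.mem_cons_self)
      obtain ⟨hcrest, _⟩ := idxFrom_cons pvCls L (L.length - t) t c crest rfl hcl
      have hcdw : (pvIdxFrom pvCls L pos).dropWhile (fun x => decide (x < t)) = c :: crest := by
        rw [idxFrom_dropWhile pvCls L (t - pos) pos t rfl hpt, hcl]
      rw [run_close L (L.length - t) t c crest "" ss rfl hcl,
        IH (L.length - (c+1)) (by omega) (c+1) _ rfl,
        pvLoop_cons L pos _ _ t c trest crest hdw' hcdw,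
        htrest, hcrest, pvLoop_trig_shift L (c+1) (t+1) (by omega)]
      simp


-- ===== VERDICT (by name: the statement is the Claim_ definition above) =====
theorem parse_structs_spec : Claim_equal_parse_structs := by
  intro lines _
  unfold Spec_parse_structs parse_structs parse_structs_alt
  have h := main_loop lines lines.length 0 PySem.Set.empty (by omega)
  rw [List.drop_zero] at h
  rw [h, pvIdx_eq, pvIdx_eq, PySem.Set.ofList_eq_foldl]
  rfl
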